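-- pv_equiv track=rewrite | github.com/Rida97/PythonCode | pract.py | QuestionsMarks
-- ===== SOURCE A (Python) =====
-- def QuestionsMarks(s):
--   qnum = 0
--   dig = 0
--   has_10 = False
--   for ch in s:
--     if ch.isdigit():
--       if int(ch) + dig == 10:
--         if qnum != 3:
--           return 'false'
--         has_10 = True
--       dig = int(ch)
--       qnum = 0
--     elif ch == '?':
--       qnum += 1
--   return 'true' if has_10 else 'false'
-- ===== SOURCE B (Python) =====
-- def QuestionsMarks(s):
--     # Two-pass: index all digits, then check the '?' count between each
--     # adjacent digit pair that sums to 10.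
--     digs = [(i, int(c)) for i, c in enumerate(s) if c.isdigit()]
--     tens = [(i, j) for (i, d), (j, e) in zip(digs, digs[1:]) if d + e == 10]
--     if not tens:
--         return 'false'
--     return 'true' if all(s[i + 1:j].count('?') == 3 for i, j in tens) else 'false'
-- ===== Notes on version B (the rewrite author's own statement) =====
-- stated objective: alternative
-- what changed: Replaces the streaming scan that tracks the previous digit and a running '?' counter with a two-pass decomposition: build an index table of (position, digit), select adjacent pairs summing to 10, and count '?' in the original slice between each pair.
import Mathlib
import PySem

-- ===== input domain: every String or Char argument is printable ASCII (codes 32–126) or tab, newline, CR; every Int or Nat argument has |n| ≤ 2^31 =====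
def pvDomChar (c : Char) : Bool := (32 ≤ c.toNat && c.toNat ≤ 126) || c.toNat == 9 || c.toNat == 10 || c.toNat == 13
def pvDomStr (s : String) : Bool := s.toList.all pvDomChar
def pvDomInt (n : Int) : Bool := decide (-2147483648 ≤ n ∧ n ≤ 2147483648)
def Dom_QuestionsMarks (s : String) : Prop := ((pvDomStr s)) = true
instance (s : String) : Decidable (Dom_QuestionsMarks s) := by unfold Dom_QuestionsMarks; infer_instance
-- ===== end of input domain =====

-- B replaces A's streaming scan (previous digit + running '?' counter) with a two-pass
-- decomposition: an index table of digits, then slice-counts between adjacent sum-10 pairs.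
-- Objective: alternative (same cost, different decomposition).

-- ===== PORT A =====
-- int(ch) for an isdigit-guarded ASCII char is exactly its code minus 48
def pvVal (c : Char) : Int := (c.toNat : Int) - 48

def pvQMA : List Char → Int → Int → Bool → String
  | [], _, _, h => if h then "true" else "false"
  | c :: t, qnum, dig, h =>
    if PySem.Chars.isdigit c then
      if pvVal c + dig = 10 then
        if qnum ≠ 3 then "false"
        else pvQMA t 0 (pvVal c) true
      else pvQMA t 0 (pvVal c) h
    else if c = '?' then pvQMA t (qnum + 1) dig h
    else pvQMA t qnum dig h

def QuestionsMarks (s : String) : String := pvQMA s.toList 0 0 false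

-- ===== PORT B =====
def pvDigs (xs : List (Int × Char)) : List (Int × Int) :=
  xs.filterMap (fun ic => if PySem.Chars.isdigit ic.2 then some (ic.1, pvVal ic.2) else none)

def pvTens (digs : List (Int × Int)) : List (Int × Int) :=
  (digs.zip digs.tail).filterMap (fun p => if p.1.2 + p.2.2 = 10 then some (p.1.1, p.2.1) else none)

def QuestionsMarks_alt (s : String) : String :=
  let l := s.toList
  let tens := pvTens (pvDigs (PySem.List.enumerate l))
  if tens = [] then "false"
  else if tens.all (fun p => (PySem.List.slice l (some (p.1 + 1)) (some p.2)).count '?' = 3)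
       then "true" else "false"

-- ===== PRECONDITION & SPEC =====
def Spec_QuestionsMarks (s : String) (out : String) : Prop := out = QuestionsMarks_alt s
instance (s : String) (out : String) : Decidable (Spec_QuestionsMarks s out) := by unfold Spec_QuestionsMarks; infer_instance

-- ===== CLAIM (what is proved, stated in full; the proofs are below) =====
def Claim_equal_QuestionsMarks : Prop := ∀ (s : String), Dom_QuestionsMarks s → Spec_QuestionsMarks s (QuestionsMarks s)

-- ===== LEMMAS AND PROOFS =====

-- gap list: for each digit encountered, the triple (previous digit, '?'s since it, this digit)
def pvGaps : List Char → Int → Int → List (Int × Int × Int)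
  | [], _, _ => []
  | c :: t, dig, q =>
    if PySem.Chars.isdigit c then (dig, q, pvVal c) :: pvGaps t (pvVal c) 0
    else if c = '?' then pvGaps t dig (q + 1) else pvGaps t dig q

def pvOk (p : Int × Int × Int) : Bool := decide (p.1 + p.2.2 = 10 → p.2.1 = 3)
def pvTen (p : Int × Int × Int) : Bool := decide (p.1 + p.2.2 = 10)

lemma qma_char : ∀ (l : List Char) (q d : Int) (h : Bool),
    pvQMA l q d h =
      if (pvGaps l d q).all pvOk && (h || (pvGaps l d q).any pvTen) then "true" else "false" := by
  intro l
  induction l with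
  | nil => intro q d h; cases h <;> simp [pvQMA, pvGaps]
  | cons c t ih =>
    intro q d h
    by_cases hd : PySem.Chars.isdigit c
    · rw [show pvGaps (c :: t) d q = (d, q, pvVal c) :: pvGaps t (pvVal c) 0 from by
        simp [pvGaps, hd]]
      by_cases h10 : pvVal c + d = 10
      · have h10' : d + pvVal c = 10 := by omega
        by_cases hq : q = 3
        · have e1 : pvQMA (c :: t) q d h = pvQMA t 0 (pvVal c) true := by
            simp [pvQMA, hd, h10, hq]
          rw [e1, ih]
          simp only [List.all_cons, List.any_cons, pvOk, pvTen]
          have hdec1 : decide (d + pvVal c = 10 → q = 3) = true := decide_eq_true (fun _ => hq)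
          have hdec2 : decide (d + pvVal c = 10) = true := decide_eq_true h10'
          simp only [hdec1, hdec2, Bool.true_and, Bool.true_or, Bool.or_true, Bool.and_true]
        · have e1 : pvQMA (c :: t) q d h = "false" := by simp [pvQMA, hd, h10, hq]
          rw [e1]
          simp only [List.all_cons, List.any_cons, pvOk, pvTen]
          have hdec1 : decide (d + pvVal c = 10 → q = 3) = false :=
            decide_eq_false (fun himp => hq (himp h10'))
          simp only [hdec1, Bool.false_and]
          rfl
      · have h10' : d + pvVal c ≠ 10 := by omega
        have e1 : pvQMA (c :: t) q d h = pvQMA t 0 (pvVal c) h := by simp [pvQMA, hd, h10]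
        rw [e1, ih]
        simp only [List.all_cons, List.any_cons, pvOk, pvTen]
        have hdec1 : decide (d + pvVal c = 10 → q = 3) = true :=
          decide_eq_true (fun hx => absurd hx h10')
        have hdec2 : decide (d + pvVal c = 10) = false := decide_eq_false h10'
        simp only [hdec1, hdec2, Bool.true_and, Bool.false_or]
    · rw [Bool.not_eq_true] at hd
      by_cases hq : c = '?'
      · subst hq
        have hd' : PySem.Chars.isdigit '?' = false := by decide
        rw [show pvGaps ('?' :: t) d q = pvGaps t d (q + 1) from by simp [pvGaps, hd']]
        simp [pvQMA, hd', ih]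
      · rw [show pvGaps (c :: t) d q = pvGaps t d q from by simp [pvGaps, hd, hq]]
        simp [pvQMA, hd, hq, ih]

-- positions-with-values table, offset form
def pvDigsF : List Char → Nat → List (Int × Int)
  | [], _ => []
  | c :: t, n =>
    if PySem.Chars.isdigit c then ((n : Int), pvVal c) :: pvDigsF t (n + 1) else pvDigsF t (n + 1)

lemma digs_enum : ∀ (l : List Char) (n : Nat),
    pvDigs (PySem.List.enumerate l (n : Int)) = pvDigsF l n := by
  intro l
  induction l with
  | nil => intro n; simp [pvDigs, pvDigsF, PySem.List.enumerate_nil]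
  | cons c t ih =>
    intro n
    rw [PySem.List.enumerate_cons]
    by_cases hd : PySem.Chars.isdigit c <;>
      simp [pvDigs, pvDigsF, hd, ← ih (n + 1)]

-- pair list of B, with slice '?' counts, abstracted
def pvPL (l₀ : List Char) (digs : List (Int × Int)) : List (Int × Int × Int) :=
  (digs.zip digs.tail).map
    (fun p => (p.1.2, ((PySem.List.slice l₀ (some (p.1.1 + 1)) (some p.2.1)).count '?' : Int), p.2.2))

lemma zip_empty_iff (l₀ : List Char) :
    ∀ (z : List ((Int × Int) × (Int × Int))),
    ((z.filterMap (fun p => if p.1.2 + p.2.2 = 10 then some (p.1.1, p.2.1) else none)) = [])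
      ↔ ((z.map (fun p => (p.1.2, ((PySem.List.slice l₀ (some (p.1.1 + 1)) (some p.2.1)).count '?' : Int), p.2.2))).any pvTen = false) := by
  intro z
  induction z with
  | nil => simp
  | cons x t ih =>
    by_cases h10 : x.1.2 + x.2.2 = 10
    · simp [h10, pvTen]
    · simp [h10, pvTen, ih]

lemma zip_all_iff (l₀ : List Char) :
    ∀ (z : List ((Int × Int) × (Int × Int))),
    ((z.filterMap (fun p => if p.1.2 + p.2.2 = 10 then some (p.1.1, p.2.1) else none)).all
        (fun p => (PySem.List.slice l₀ (some (p.1 + 1)) (some p.2)).count '?' = 3))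
      = ((z.map (fun p => (p.1.2, ((PySem.List.slice l₀ (some (p.1.1 + 1)) (some p.2.1)).count '?' : Int), p.2.2))).all pvOk) := by
  intro z
  induction z with
  | nil => simp
  | cons x t ih =>
    by_cases h10 : x.1.2 + x.2.2 = 10
    · simp only [List.filterMap_cons, h10, if_pos, List.map_cons, List.all_cons, ih, pvOk]
      simp [(show ∀ n : ℕ, ((n : ℤ) = 3 ↔ n = 3) from fun n => by omega)]
    · simp [h10, pvOk, ih]

lemma tens_empty_iff (l₀ : List Char) (digs : List (Int × Int)) :
    (pvTens digs = []) ↔ (pvPL l₀ digs).any pvTen = false := by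
  exact zip_empty_iff l₀ (digs.zip digs.tail)

lemma tens_all_iff (l₀ : List Char) (digs : List (Int × Int)) :
    ((pvTens digs).all (fun p => (PySem.List.slice l₀ (some (p.1 + 1)) (some p.2)).count '?' = 3))
      = (pvPL l₀ digs).all pvOk := by
  exact zip_all_iff l₀ (digs.zip digs.tail)

-- the inner pair list: pairs strictly between digits of l
def pvGapsInner : List Char → List (Int × Int × Int)
  | [] => []
  | c :: t => if PySem.Chars.isdigit c then pvGaps t (pvVal c) 0 else pvGapsInner t

lemma core : ∀ (l : List Char) (l₀ : List Char) (n ip : Nat) (q : Nat) (dp : Int),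
    ip < n → l₀.drop n = l →
    ((l₀.drop (ip + 1)).take (n - (ip + 1))).count '?' = q →
    pvPL l₀ (((ip : Int), dp) :: pvDigsF l n) = pvGaps l dp (q : Int) := by
  intro l
  induction l with
  | nil => intro l₀ n ip q dp _ _ _; simp [pvDigsF, pvPL, pvGaps]
  | cons c t ih =>
    intro l₀ n ip q dp hin hdrop hq
    have hn : n < l₀.length := by
      by_contra hle
      rw [List.drop_eq_nil_of_le (by omega)] at hdrop; exact (List.cons_ne_nil _ _) hdrop.symm
    have hget : l₀[n]? = some c := by
      have h0 : (l₀.drop n)[0]? = l₀[n + 0]? := List.getElem?_drop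
      rw [hdrop] at h0; simpa using h0.symm
    have hdrop' : l₀.drop (n + 1) = t := by
      have : l₀.drop (n + 1) = (l₀.drop n).drop 1 := by rw [List.drop_drop]
      simp [this, hdrop]
    by_cases hd : PySem.Chars.isdigit c
    · -- digit: emit pair (dp, q, val c), restart gap at 0 after position n
      have hslice : (PySem.List.slice l₀ (some ((ip : Int) + 1)) (some (n : Int))).count '?' = q := by
        have : ((ip : Int) + 1) = ((ip + 1 : Nat) : Int) := by push_cast; ring
        rw [this, PySem.List.slice_natCast]; exact hq
      have hrest : pvPL l₀ (((n : Int), pvVal c) :: pvDigsF t (n + 1)) = pvGaps t (pvVal c) 0 := by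
        have := ih l₀ (n + 1) n 0 (pvVal c) (by omega) hdrop' (by simp)
        simpa using this
      simp only [pvDigsF, hd, if_pos, pvGaps]
      show pvPL l₀ (((ip : Int), dp) :: ((n : Int), pvVal c) :: pvDigsF t (n + 1)) = _
      rw [show pvPL l₀ (((ip : Int), dp) :: ((n : Int), pvVal c) :: pvDigsF t (n + 1))
            = (dp, ((PySem.List.slice l₀ (some ((ip : Int) + 1)) (some (n : Int))).count '?' : Int), pvVal c)
              :: pvPL l₀ (((n : Int), pvVal c) :: pvDigsF t (n + 1)) from by simp [pvPL]]
      rw [hrest, hslice]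
    · -- non-digit at position n: gap count extends by (c == '?')
      have hq' : ((l₀.drop (ip + 1)).take (n + 1 - (ip + 1))).count '?'
          = q + (if c = '?' then 1 else 0) := by
        have hidx : (l₀.drop (ip + 1))[n - (ip + 1)]? = some c := by
          rw [List.getElem?_drop]
          rw [show ip + 1 + (n - (ip + 1)) = n from by omega]; exact hget
        rw [show n + 1 - (ip + 1) = (n - (ip + 1)) + 1 from by omega, List.take_add_one, hidx]
        simp [List.count_append, hq]
        split_ifs <;> simp_all
      by_cases hqm : c = '?'
      · simp only [pvDigsF, pvGaps, hqm, if_pos]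
        have := ih l₀ (n + 1) ip (q + 1) dp (by omega) hdrop' (by rw [hq']; simp [hqm])
        rw [show ((q : Int) + 1) = (((q + 1 : Nat)) : Int) from by push_cast; ring]
        simpa [hqm, pvGaps, hd] using this
      · have := ih l₀ (n + 1) ip q dp (by omega) hdrop' (by rw [hq']; simp [hqm])
        simpa [pvDigsF, pvGaps, hd, hqm] using this

lemma core0 : ∀ (l : List Char) (l₀ : List Char) (n : Nat),
    l₀.drop n = l → pvPL l₀ (pvDigsF l n) = pvGapsInner l := by
  intro l
  induction l with
  | nil => intro l₀ n _; simp [pvDigsF, pvPL, pvGapsInner]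
  | cons c t ih =>
    intro l₀ n hdrop
    have hdrop' : l₀.drop (n + 1) = t := by
      have : l₀.drop (n + 1) = (l₀.drop n).drop 1 := by rw [List.drop_drop]
      simp [this, hdrop]
    by_cases hd : PySem.Chars.isdigit c
    · simp only [pvDigsF, hd, if_pos, pvGapsInner]
      exact core t l₀ (n + 1) n 0 (pvVal c) (by omega) hdrop' (by simp)
    · simpa [pvDigsF, pvGapsInner, hd] using ih l₀ (n + 1) hdrop'

lemma val_le_nine {c : Char} (h : PySem.Chars.isdigit c = true) : 0 ≤ pvVal c ∧ pvVal c ≤ 9 := by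
  simp only [PySem.Chars.isdigit, Bool.and_eq_true, decide_eq_true_eq] at h
  obtain ⟨ha, hb⟩ := h
  rw [Char.le_def, UInt32.le_iff_toNat_le] at ha hb
  simp only [pvVal]
  constructor <;> [skip; skip] <;>
    · have h48 : (('0' : Char).val.toNat) = 48 := by decide
      have h57 : (('9' : Char).val.toNat) = 57 := by decide
      simp only [Char.toNat] at *
      omega

lemma head_equiv : ∀ (l : List Char) (q : Int),
    (pvGaps l 0 q).all pvOk = (pvGapsInner l).all pvOk ∧
    (pvGaps l 0 q).any pvTen = (pvGapsInner l).any pvTen := by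
  intro l
  induction l with
  | nil => intro q; simp [pvGaps, pvGapsInner]
  | cons c t ih =>
    intro q
    by_cases hd : PySem.Chars.isdigit c
    · have h9 := val_le_nine hd
      have h10 : pvVal c ≠ 10 := by omega
      constructor <;> simp [pvGaps, pvGapsInner, hd, pvOk, pvTen, h10]
    · have hq' : PySem.Chars.isdigit '?' = false := by decide
      by_cases hqm : c = '?' <;> simp [pvGaps, pvGapsInner, hd, hqm, hq', ih]

lemma alt_char (s : String) :
    QuestionsMarks_alt s =
      if (pvGapsInner s.toList).all pvOk && (pvGapsInner s.toList).any pvTen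
      then "true" else "false" := by
  unfold QuestionsMarks_alt
  have henum : pvDigs (PySem.List.enumerate s.toList) = pvDigsF s.toList 0 := by
    have := digs_enum s.toList 0; simpa using this
  have hpl : pvPL s.toList (pvDigsF s.toList 0) = pvGapsInner s.toList :=
    core0 s.toList s.toList 0 (by simp)
  simp only [henum]
  by_cases he : pvTens (pvDigsF s.toList 0) = []
  · have hany := (tens_empty_iff s.toList (pvDigsF s.toList 0)).mp he
    rw [hpl] at hany
    simp [he, hany]
  · have hany : (pvGapsInner s.toList).any pvTen = true := by
      by_contra hc
      have : (pvPL s.toList (pvDigsF s.toList 0)).any pvTen = false := by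
        rw [hpl]; simpa using hc
      exact he ((tens_empty_iff s.toList (pvDigsF s.toList 0)).mpr this)
    have hall := tens_all_iff s.toList (pvDigsF s.toList 0)
    rw [hpl] at hall
    simp only [he, hany, Bool.and_true]
    rw [← hall]
    split_ifs with h1 h2 <;> simp_all

-- ===== VERDICT (by name: the statement is the Claim_ definition above) =====
theorem QuestionsMarks_spec : Claim_equal_QuestionsMarks := by
  intro s _
  show QuestionsMarks s = QuestionsMarks_alt s
  rw [QuestionsMarks, qma_char, alt_char]
  have := head_equiv s.toList 0
  rw [this.1, this.2]
  simp only [Bool.false_or]
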